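-- pv_equiv track=rewrite | github.com/pdhall99/PatternOmatic | nlp/engine.py | _all_feature_terminal_list
-- ===== SOURCE A (Python) =====
-- def _all_feature_terminal_list(features_dict: dict) -> list:
--     """
--     Stacks all feature terminal options in a list of lists to be used for the extended pattern syntax set operators
--     Args:
--         features_dict: dictionary of feature keys with all possible feature value options
--
--     Returns:
--
--     """
--     all_terminal_list = list()
--
--     for item in list(features_dict.items()):
--         current_terminal_holder = list()
--
--         for terminal_list_item in item[1]:
--             if len(current_terminal_holder) > 0:
--                 temp_list = list(current_terminal_holder[-1])
--                 temp_list.append(terminal_list_item)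
--                 current_terminal_holder.append(temp_list)
--             else:
--                 current_terminal_holder.append([terminal_list_item])
--
--         all_terminal_list += current_terminal_holder
--
--     return all_terminal_list
-- ===== SOURCE B (Python) =====
-- def _all_feature_terminal_list(features_dict: dict) -> list:
--     out = []
--     for value in features_dict.values():
--         vals = list(value)
--         for i in range(1, len(vals) + 1):
--             out.append(vals[:i])
--     return out
-- ===== Notes on version B (the rewrite author's own statement) =====
-- stated objective: simpler
-- what changed: B computes each cumulative prefix directly as a fresh front slice vals[:i] over range(1, len+1), eliminating A's accumulator that copies and extends the previous prefix and its empty/non-empty branch.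
import Mathlib
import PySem

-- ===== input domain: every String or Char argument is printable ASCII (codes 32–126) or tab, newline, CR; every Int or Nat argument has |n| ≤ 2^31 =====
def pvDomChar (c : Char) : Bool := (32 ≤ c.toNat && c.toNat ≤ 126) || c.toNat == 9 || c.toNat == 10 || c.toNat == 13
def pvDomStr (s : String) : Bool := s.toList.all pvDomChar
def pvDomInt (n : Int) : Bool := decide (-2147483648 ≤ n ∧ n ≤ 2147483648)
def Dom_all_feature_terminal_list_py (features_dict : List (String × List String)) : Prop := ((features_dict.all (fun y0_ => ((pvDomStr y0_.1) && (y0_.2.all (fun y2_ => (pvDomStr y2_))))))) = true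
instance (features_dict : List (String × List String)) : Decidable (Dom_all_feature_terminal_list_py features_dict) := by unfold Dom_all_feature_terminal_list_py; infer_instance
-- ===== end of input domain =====

-- B replaces A's copy-and-extend accumulator (with its empty/non-empty branch) by emitting
-- each cumulative prefix directly as a fresh front slice vals[:i]; same cost, simpler.

-- ===== PORT A =====
-- inner loop of A: build prefixes by extending a copy of the last accumulated prefix
def all_feature_terminal_list_py (features_dict : List (String × List String)) : List (List String) :=
  features_dict.foldl (fun all_terminal_list item =>
    all_terminal_list ++
      item.2.foldl (fun current_terminal_holder terminal_list_item =>
        if current_terminal_holder.length > 0 then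
          -- temp_list = list(holder[-1]); temp_list.append(x); holder.append(temp_list)
          current_terminal_holder ++ [PySem.List.pyGetD current_terminal_holder (-1) [] ++ [terminal_list_item]]
        else
          current_terminal_holder ++ [[terminal_list_item]]) []) []

-- ===== PORT B =====
def all_feature_terminal_list_py_alt (features_dict : List (String × List String)) : List (List String) :=
  features_dict.foldl (fun out kv =>
    out ++ (PySem.List.pyRange 1 ((kv.2.length : Int) + 1) 1).map
      (fun i => PySem.List.slice kv.2 none (some i))) []

-- ===== PRECONDITION & SPEC =====
def Spec_all_feature_terminal_list_py (features_dict : List (String × List String)) (out : List (List String)) : Prop := out = all_feature_terminal_list_py_alt features_dict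
instance (features_dict : List (String × List String)) (out : List (List String)) : Decidable (Spec_all_feature_terminal_list_py features_dict out) := by unfold Spec_all_feature_terminal_list_py; infer_instance

-- ===== CLAIM (what is proved, stated in full; the proofs are below) =====
def Claim_equal_all_feature_terminal_list_py : Prop := ∀ (features_dict : List (String × List String)), Dom_all_feature_terminal_list_py features_dict → Spec_all_feature_terminal_list_py features_dict (all_feature_terminal_list_py features_dict)

-- ===== LEMMAS AND PROOFS =====

-- prefix list: the k-th element is the first (k+1) values
def pvPrefixes (vs : List String) : List (List String) :=
  (List.range vs.length).map (fun k => vs.take (k + 1))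

theorem pvPrefixes_append_singleton (vs : List String) (x : String) :
    pvPrefixes (vs ++ [x]) = pvPrefixes vs ++ [vs ++ [x]] := by
  unfold pvPrefixes
  simp [List.range_succ]

theorem pvPrefixes_last (vs : List String) (h : vs ≠ []) :
    PySem.List.pyGetD (pvPrefixes vs) (-1) [] = vs := by
  have h1 : vs = vs.dropLast ++ [vs.getLast h] := (List.dropLast_append_getLast h).symm
  calc PySem.List.pyGetD (pvPrefixes vs) (-1) []
      = PySem.List.pyGetD (pvPrefixes (vs.dropLast ++ [vs.getLast h])) (-1) [] := by rw [← h1]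
    _ = PySem.List.pyGetD (pvPrefixes vs.dropLast ++ [vs.dropLast ++ [vs.getLast h]]) (-1) [] := by
        rw [pvPrefixes_append_singleton]
    _ = vs.dropLast ++ [vs.getLast h] := PySem.List.pyGetD_neg_one_append_singleton _ _ _
    _ = vs := h1.symm

-- A's inner fold computes exactly the prefix list
theorem pvInnerA (vs : List String) :
    vs.foldl (fun holder x =>
      if holder.length > 0 then holder ++ [PySem.List.pyGetD holder (-1) [] ++ [x]]
      else holder ++ [[x]]) [] = pvPrefixes vs := by
  induction vs using List.reverseRecOn with
  | nil => simp [pvPrefixes]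
  | append_singleton vs x ih =>
    rw [List.foldl_append, ih, pvPrefixes_append_singleton]
    by_cases h : vs = []
    · subst h; simp [pvPrefixes]
    · have hne : pvPrefixes vs ≠ [] := by
        unfold pvPrefixes
        simp [List.length_eq_zero_iff, h]
      simp only [List.foldl_cons, List.foldl_nil]
      rw [if_pos (by simpa [List.length_pos_iff] using hne)]
      rw [pvPrefixes_last vs h]

-- B's inner map computes the same prefix list
theorem pvInnerB (vs : List String) :
    (PySem.List.pyRange 1 ((vs.length : Int) + 1) 1).map
      (fun i => PySem.List.slice vs none (some i)) = pvPrefixes vs := by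
  rw [PySem.List.pyRange_one]
  have hlen : ((vs.length : Int) + 1 - 1).toNat = vs.length := by omega
  rw [hlen]
  unfold pvPrefixes
  rw [List.map_map]
  apply List.map_congr_left
  intro k hk
  simp only [Function.comp]
  rw [show (1 : Int) + (k : Int) = ((k + 1 : Nat) : Int) by push_cast; ring,
    PySem.List.slice_to_natCast]

theorem pvFoldEq (l : List (String × List String)) (acc : List (List String)) :
    l.foldl (fun all_terminal_list item =>
      all_terminal_list ++
        item.2.foldl (fun holder x =>
          if holder.length > 0 then holder ++ [PySem.List.pyGetD holder (-1) [] ++ [x]]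
          else holder ++ [[x]]) []) acc
    = l.foldl (fun out kv =>
        out ++ (PySem.List.pyRange 1 ((kv.2.length : Int) + 1) 1).map
          (fun i => PySem.List.slice kv.2 none (some i))) acc := by
  induction l generalizing acc with
  | nil => rfl
  | cons hd tl ih =>
    simp only [List.foldl_cons]
    rw [pvInnerA, pvInnerB, ih]

-- ===== VERDICT (by name: the statement is the Claim_ definition above) =====
theorem all_feature_terminal_list_py_spec : Claim_equal_all_feature_terminal_list_py := by
  intro fd _
  unfold Spec_all_feature_terminal_list_py all_feature_terminal_list_py all_feature_terminal_list_py_alt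
  exact pvFoldEq fd []
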